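-- pv_equiv track=rewrite | github.com/aniajj9/CryptoComputing | 1 Blood Type Assigmnent/bloodtype_compatibility_test.py | logic_compatibility
-- ===== SOURCE A (Python) =====
-- def encode_blood_type(blood_type_string):
--     # Define blood type encodings
--     blood_types = {
--         '0-': 0b000,
--         '0+': 0b001,
--         'A-': 0b100,
--         'A+': 0b101,
--         'B-': 0b010,
--         'B+': 0b011,
--         'AB-': 0b110,
--         'AB+': 0b111
--     }
--     return blood_types.get(blood_type_string)
--
-- def logic_compatibility(blood_type_receiver, blood_type_donor) -> bool:
--     blood_type_receiver_encoded = encode_blood_type(blood_type_receiver)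
--     blood_type_donor_encoded = encode_blood_type(blood_type_donor)
--
--     def are_bits_compatible(number1, number2, bit_position) -> bool:
--         bit1 = (number1 >> bit_position) & 1
--         bit2 = (number2 >> bit_position) & 1
--         return bit1 == bit2 or not (number1 & (1 << bit_position))
--
--     return all(are_bits_compatible(blood_type_receiver_encoded, blood_type_donor_encoded, bit_position) for bit_position in range(3))
-- ===== SOURCE B (Python) =====
-- def encode_blood_type(blood_type_string):
--     blood_types = {
--         '0-': 0b000,
--         '0+': 0b001,
--         'A-': 0b100,
--         'A+': 0b101,
--         'B-': 0b010,
--         'B+': 0b011,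
--         'AB-': 0b110,
--         'AB+': 0b111
--     }
--     return blood_types.get(blood_type_string)
--
-- def logic_compatibility(blood_type_receiver, blood_type_donor) -> bool:
--     receiver = encode_blood_type(blood_type_receiver)
--     donor = encode_blood_type(blood_type_donor)
--     # every antigen bit set for the receiver must also be set for the donor
--     return (receiver & ~donor) == 0
-- ===== Notes on version B (the rewrite author's own statement) =====
-- stated objective: simpler
-- what changed: Replaces the per-bit loop over range(3) with its helper predicate by a single closed-form bitmask subset test (receiver & ~donor) == 0.
import Mathlib
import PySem

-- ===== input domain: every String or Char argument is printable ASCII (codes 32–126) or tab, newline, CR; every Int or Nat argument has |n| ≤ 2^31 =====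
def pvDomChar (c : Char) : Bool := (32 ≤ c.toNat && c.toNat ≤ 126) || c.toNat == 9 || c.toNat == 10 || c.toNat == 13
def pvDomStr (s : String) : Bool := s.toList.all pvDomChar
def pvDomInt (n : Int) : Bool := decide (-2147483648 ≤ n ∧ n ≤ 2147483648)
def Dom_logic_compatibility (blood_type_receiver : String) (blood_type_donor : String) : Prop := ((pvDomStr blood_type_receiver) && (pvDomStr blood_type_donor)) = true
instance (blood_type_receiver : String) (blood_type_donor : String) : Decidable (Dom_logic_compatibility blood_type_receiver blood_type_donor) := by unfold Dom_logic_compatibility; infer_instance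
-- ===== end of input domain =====

-- B replaces A's per-bit loop with one closed-form bitmask subset test; objective: simpler.
-- Pre_ excludes inputs where either string is not a valid blood-type key: there both A and B raise TypeError.


-- ===== PORT A =====
def encode_blood_type (blood_type_string : String) : Option Int :=
  (PySem.Dict.ofList [("0-", (0 : Int)), ("0+", 1), ("A-", 4), ("A+", 5),
                      ("B-", 2), ("B+", 3), ("AB-", 6), ("AB+", 7)]).get? blood_type_string

-- Python >> is '>>>', & is PySem.Int.band, << is '<<<' (exact, per PYSEM.md);
-- 'not (number1 & (1 << bit_position))' is truthiness: that int == 0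
def are_bits_compatible (number1 : Int) (number2 : Int) (bit_position : Nat) : Bool :=
  let bit1 := PySem.Int.band (number1 >>> bit_position) 1
  let bit2 := PySem.Int.band (number2 >>> bit_position) 1
  bit1 == bit2 || PySem.Int.band number1 ((1 : Int) <<< bit_position) == 0

def logic_compatibility (blood_type_receiver : String) (blood_type_donor : String) : Bool :=
  match encode_blood_type blood_type_receiver, encode_blood_type blood_type_donor with
  | some r, some d => (List.range 3).all (fun bit_position => are_bits_compatible r d bit_position)
  | _, _ => false   -- Python raises TypeError here; excluded by Pre_

-- ===== PORT B =====
def encode_blood_type_b (blood_type_string : String) : Option Int :=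
  (PySem.Dict.ofList [("0-", (0 : Int)), ("0+", 1), ("A-", 4), ("A+", 5),
                      ("B-", 2), ("B+", 3), ("AB-", 6), ("AB+", 7)]).get? blood_type_string

def logic_compatibility_alt (blood_type_receiver : String) (blood_type_donor : String) : Bool :=
  match encode_blood_type_b blood_type_receiver with
  | none => false   -- Python raises TypeError here; excluded by Pre_
  | some r =>
    match encode_blood_type_b blood_type_donor with
    | none => false   -- Python raises TypeError here; excluded by Pre_
    | some d => PySem.Int.band r (Int.not d) == 0   -- (receiver & ~donor) == 0

-- ===== PRECONDITION & SPEC =====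
-- Pre_ admits exactly the valid blood-type strings; on any other string Python A raises TypeError.
def Pre_logic_compatibility (blood_type_receiver : String) (blood_type_donor : String) : Prop :=
  blood_type_receiver ∈ ["0-", "0+", "A-", "A+", "B-", "B+", "AB-", "AB+"] ∧
  blood_type_donor ∈ ["0-", "0+", "A-", "A+", "B-", "B+", "AB-", "AB+"]
instance (blood_type_receiver : String) (blood_type_donor : String) : Decidable (Pre_logic_compatibility blood_type_receiver blood_type_donor) := by unfold Pre_logic_compatibility; infer_instance
def pvWitness_logic_compatibility : String × String := ("A+", "0-")

def Spec_logic_compatibility (blood_type_receiver : String) (blood_type_donor : String) (out : Bool) : Prop := out = logic_compatibility_alt blood_type_receiver blood_type_donor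
instance (blood_type_receiver : String) (blood_type_donor : String) (out : Bool) : Decidable (Spec_logic_compatibility blood_type_receiver blood_type_donor out) := by unfold Spec_logic_compatibility; infer_instance

-- ===== CLAIM (what is proved, stated in full; the proofs are below) =====
def Claim_equal_logic_compatibility : Prop := ∀ (blood_type_receiver : String) (blood_type_donor : String), Dom_logic_compatibility blood_type_receiver blood_type_donor → Pre_logic_compatibility blood_type_receiver blood_type_donor → Spec_logic_compatibility blood_type_receiver blood_type_donor (logic_compatibility blood_type_receiver blood_type_donor)

-- ===== LEMMAS AND PROOFS =====

-- ===== VERDICT (by name: the statement is the Claim_ definition above) =====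
theorem logic_compatibility_spec : Claim_equal_logic_compatibility := by
  intro r d _ hpre
  obtain ⟨hr, hd⟩ := hpre
  fin_cases hr <;> fin_cases hd <;>
    decide
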